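-- pv_equiv track=rewrite | github.com/iannil/one-data-studio | services/data-api/services/asset_auto_catalog_service.py | _infer_data_level
-- ===== SOURCE A (Python) =====
-- from typing import Any, Dict, List, Optional
--
-- def _infer_data_level(
--
--     columns: List[Dict[str, Any]],
--     db_session,
-- ) -> str:
--     """根据列敏感度推断数据等级"""
--     level_priority = {
--         "restricted": 4,
--         "confidential": 3,
--         "internal": 2,
--         "public": 1,
--     }
--
--     max_level = "public"
--     max_priority = 0
--
--     for col in columns:
--         sensitivity_level = col.get("sensitivity_level")
--         if sensitivity_level and sensitivity_level in level_priority: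
--             if level_priority[sensitivity_level] > max_priority:
--                 max_priority = level_priority[sensitivity_level]
--                 max_level = sensitivity_level
--
--     return max_level
-- ===== SOURCE B (Python) =====
-- def _infer_data_level(columns, db_session):
--     """Infer data level: highest sensitivity level present among columns."""
--     present = {c.get("sensitivity_level") for c in columns}
--     for level in ("restricted", "confidential", "internal", "public"):
--         if level in present:
--             return level
--     return "public"
-- ===== Notes on version B (the rewrite author's own statement) =====
-- stated objective: idiomatic
-- what changed: Instead of scanning columns while tracking a running (max_level, max_priority) pair keyed through a priority dict, B builds the set of present sensitivity values once and walks the four levels in descending priority, returning the first one present.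
import Mathlib
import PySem

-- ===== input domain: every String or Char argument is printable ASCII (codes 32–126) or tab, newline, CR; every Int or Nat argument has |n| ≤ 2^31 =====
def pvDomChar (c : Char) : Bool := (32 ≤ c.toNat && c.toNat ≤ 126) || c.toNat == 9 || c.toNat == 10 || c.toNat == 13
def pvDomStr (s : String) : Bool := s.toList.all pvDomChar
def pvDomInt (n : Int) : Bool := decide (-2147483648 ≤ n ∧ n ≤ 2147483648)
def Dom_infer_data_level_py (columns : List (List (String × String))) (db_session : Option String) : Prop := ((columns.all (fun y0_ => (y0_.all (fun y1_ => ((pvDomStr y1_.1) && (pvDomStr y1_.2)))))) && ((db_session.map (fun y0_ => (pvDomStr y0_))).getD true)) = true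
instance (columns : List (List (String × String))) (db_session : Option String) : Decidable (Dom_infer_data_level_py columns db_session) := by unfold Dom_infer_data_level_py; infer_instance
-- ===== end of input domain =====

-- B replaces A's running (max_level, max_priority) fold keyed through a priority dict by
-- collecting the set of present sensitivity values once and walking the four levels in
-- descending priority, returning the first one present (objective: more idiomatic).

-- ===== PORT A =====
def pvLvlPrio : PySem.Dict String Int :=
  PySem.Dict.mk [("restricted", 4), ("confidential", 3), ("internal", 2), ("public", 1)]

/-- col.get("sensitivity_level") on an association-list dict -/
def pvGet (col : List (String × String)) : Option String :=
  (PySem.Dict.mk col).get? "sensitivity_level"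

def pvStepA (st : String × Int) (col : List (String × String)) : String × Int :=
  match pvGet col with
  | none => st
  | some s =>
    if s ≠ "" then          -- Python truthiness of the string
      match PySem.Dict.get? pvLvlPrio s with   -- 'in level_priority' + lookup
      | none => st
      | some p => if st.2 < p then (s, p) else st
    else st

def infer_data_level_py (columns : List (List (String × String))) (db_session : Option String) : String :=
  (columns.foldl pvStepA ("public", 0)).1

-- ===== PORT B =====
def infer_data_level_py_alt (columns : List (List (String × String))) (db_session : Option String) : String :=
  let present : PySem.Set (Option String) :=
    PySem.Set.ofList (columns.map (fun c => pvGet c))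
  match (["restricted", "confidential", "internal", "public"] : List String).find?
      (fun l => present.contains (some l)) with
  | some l => l
  | none => "public"

-- ===== PRECONDITION & SPEC =====
def Spec_infer_data_level_py (columns : List (List (String × String))) (db_session : Option String) (out : String) : Prop := out = infer_data_level_py_alt columns db_session
instance (columns : List (List (String × String))) (db_session : Option String) (out : String) : Decidable (Spec_infer_data_level_py columns db_session out) := by unfold Spec_infer_data_level_py; infer_instance

-- ===== CLAIM (what is proved, stated in full; the proofs are below) =====
def Claim_equal_infer_data_level_py : Prop := ∀ (columns : List (List (String × String))) (db_session : Option String), Dom_infer_data_level_py columns db_session → Spec_infer_data_level_py columns db_session (infer_data_level_py columns db_session)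

-- ===== LEMMAS AND PROOFS =====

/-- presence of a sensitivity level among the columns -/
def pvHas (cs : List (List (String × String))) (l : String) : Bool :=
  cs.any (fun c => pvGet c == some l)

/-- the ladder result as a function of presence flags -/
def pvTgt (cs : List (List (String × String))) (mp : Int) : String :=
  if pvHas cs "restricted" || mp == 4 then "restricted"
  else if pvHas cs "confidential" || mp == 3 then "confidential"
  else if pvHas cs "internal" || mp == 2 then "internal"
  else "public"

lemma pvHas_cons (c : List (String × String)) (cs : List (List (String × String))) (l : String) :
    pvHas (c :: cs) l = ((pvGet c == some l) || pvHas cs l) := by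
  simp [pvHas]

lemma foldA_char : ∀ (cs : List (List (String × String))) (mp : Int) (ml : String),
    ((mp = 0 ∧ ml = "public") ∨ (mp = 1 ∧ ml = "public") ∨ (mp = 2 ∧ ml = "internal") ∨
     (mp = 3 ∧ ml = "confidential") ∨ (mp = 4 ∧ ml = "restricted")) →
    (cs.foldl pvStepA (ml, mp)).1 = pvTgt cs mp := by
  intro cs
  induction cs with
  | nil =>
    intro mp ml h
    rcases h with ⟨h1, h2⟩ | ⟨h1, h2⟩ | ⟨h1, h2⟩ | ⟨h1, h2⟩ | ⟨h1, h2⟩ <;>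
      subst h1 <;> subst h2 <;> simp [pvTgt, pvHas]
  | cons c cs ih =>
    intro mp ml h
    simp only [List.foldl_cons]
    rcases hg : pvGet c with _ | s
    · rw [show pvStepA (ml, mp) c = (ml, mp) by simp [pvStepA, hg]]
      rw [ih mp ml h, pvTgt, pvTgt, pvHas_cons, pvHas_cons, pvHas_cons, hg]
      simp
    · by_cases h1 : s = "restricted"
      · subst h1
        have hp : PySem.Dict.get? pvLvlPrio "restricted" = some 4 := by decide
        by_cases hlt : mp < 4
        · rw [show pvStepA (ml, mp) c = ("restricted", 4) by
            simp [pvStepA, hg, hp, hlt]]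
          rw [ih 4 "restricted" (by tauto)]
          simp [pvTgt, pvHas_cons, hg]
        · have h4 : mp = 4 := by rcases h with ⟨e,_⟩|⟨e,_⟩|⟨e,_⟩|⟨e,_⟩|⟨e,_⟩ <;> omega
          rw [show pvStepA (ml, mp) c = (ml, mp) by simp [pvStepA, hg, hp, hlt]]
          rw [ih mp ml h]
          simp [pvTgt, pvHas_cons, hg, h4]
      · by_cases h2 : s = "confidential"
        · subst h2
          have hp : PySem.Dict.get? pvLvlPrio "confidential" = some 3 := by decide
          by_cases hlt : mp < 3
          · rw [show pvStepA (ml, mp) c = ("confidential", 3) by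
              simp [pvStepA, hg, hp, hlt]]
            rw [ih 3 "confidential" (by tauto)]
            have hne4 : mp ≠ 4 := by omega
            simp [pvTgt, pvHas_cons, hg, hne4]
          · have h34 : mp = 3 ∨ mp = 4 := by
              rcases h with ⟨e,_⟩|⟨e,_⟩|⟨e,_⟩|⟨e,_⟩|⟨e,_⟩ <;> omega
            rw [show pvStepA (ml, mp) c = (ml, mp) by simp [pvStepA, hg, hp, hlt]]
            rw [ih mp ml h]
            rcases h34 with h3 | h3 <;> simp [pvTgt, pvHas_cons, hg, h3]
        · by_cases h3 : s = "internal"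
          · subst h3
            have hp : PySem.Dict.get? pvLvlPrio "internal" = some 2 := by decide
            by_cases hlt : mp < 2
            · rw [show pvStepA (ml, mp) c = ("internal", 2) by
                simp [pvStepA, hg, hp, hlt]]
              rw [ih 2 "internal" (by tauto)]
              have hne4 : mp ≠ 4 := by omega
              have hne3 : mp ≠ 3 := by omega
              simp [pvTgt, pvHas_cons, hg, hne4, hne3]
            · have h24 : mp = 2 ∨ mp = 3 ∨ mp = 4 := by
                rcases h with ⟨e,_⟩|⟨e,_⟩|⟨e,_⟩|⟨e,_⟩|⟨e,_⟩ <;> omega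
              rw [show pvStepA (ml, mp) c = (ml, mp) by simp [pvStepA, hg, hp, hlt]]
              rw [ih mp ml h]
              rcases h24 with h4 | h4 | h4 <;> simp [pvTgt, pvHas_cons, hg, h4, h1, h2]
          · by_cases h4 : s = "public"
            · subst h4
              have hp : PySem.Dict.get? pvLvlPrio "public" = some 1 := by decide
              by_cases hlt : mp < 1
              · have h0 : mp = 0 := by rcases h with ⟨e,_⟩|⟨e,_⟩|⟨e,_⟩|⟨e,_⟩|⟨e,_⟩ <;> omega
                rw [show pvStepA (ml, mp) c = ("public", 1) by
                  simp [pvStepA, hg, hp, hlt]]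
                rw [ih 1 "public" (by tauto)]
                simp [pvTgt, pvHas_cons, hg, h0, h1, h2, h3]
              · rw [show pvStepA (ml, mp) c = (ml, mp) by simp [pvStepA, hg, hp, hlt]]
                rw [ih mp ml h]
                simp [pvTgt, pvHas_cons, hg, h1, h2, h3]
            · -- s is none of the four levels (possibly empty): step is a no-op
              have hp : PySem.Dict.get? pvLvlPrio s = none := by
                simp only [pvLvlPrio, PySem.Dict.get?]
                simp [Ne.symm h1, Ne.symm h2, Ne.symm h3, Ne.symm h4]
              have hstep : pvStepA (ml, mp) c = (ml, mp) := by
                by_cases he : s = ""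
                · simp [pvStepA, hg, he]
                · simp [pvStepA, hg, he, hp]
              rw [hstep, ih mp ml h]
              simp [pvTgt, pvHas_cons, hg, h1, h2, h3]

lemma alt_char (cs : List (List (String × String))) (db : Option String) :
    infer_data_level_py_alt cs db = pvTgt cs 0 := by
  have hmem : ∀ l : String,
      (PySem.Set.ofList (cs.map (fun c => pvGet c))).contains (some l) = pvHas cs l := by
    intro l
    rw [Bool.eq_iff_iff, PySem.Set.contains_iff, PySem.Set.mem_ofList, pvHas]
    simp [List.mem_map, List.any_eq_true]
  simp only [infer_data_level_py_alt, List.find?]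
  rw [hmem "restricted", hmem "confidential", hmem "internal", hmem "public"]
  cases hr : pvHas cs "restricted" <;> cases hc : pvHas cs "confidential" <;>
    cases hi : pvHas cs "internal" <;> cases hp : pvHas cs "public" <;>
      simp [pvTgt, hr, hc, hi, hp]

-- ===== VERDICT (by name: the statement is the Claim_ definition above) =====
theorem infer_data_level_py_spec : Claim_equal_infer_data_level_py := by
  intro columns db _
  show infer_data_level_py columns db = infer_data_level_py_alt columns db
  rw [infer_data_level_py, foldA_char columns 0 "public" (by tauto), alt_char]
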